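-- pv_equiv track=rewrite | github.com/EyasuGet/competitive-programming | A2SV G6 - Round #1 07-Feb-2025/E - From S To T 249562.py | helper
-- ===== SOURCE A (Python) =====
-- from collections import Counter
--
-- def helper(s,t,p):
--
--
--
--     found = Counter(p)
--
--
--     if len(s) > len(t):
--         return "NO"
--
--     st, right = 0, 0
--     while right < len(t):
--
--         if st<len(s) and s[st] == t[right]:
--             st += 1
--             right += 1
--
--         elif t[right] in found and found[t[right]] > 0:
--             found[t[right]] -= 1
--             right += 1
--
--         else:
--             return "NO"
--
--     if st < len(s):
--         return "NO"
--
--     return "YES"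
-- ===== SOURCE B (Python) =====
-- def helper(s, t, p):
--     # Pass 1: s must be a subsequence of t (iterator idiom).
--     it = iter(t)
--     if not all(c in it for c in s):
--         return "NO"
--     # Pass 2: every character of t not consumed by s must be covered by the pool p.
--     return "YES" if all(t.count(c) <= s.count(c) + p.count(c) for c in set(t)) else "NO"
-- ===== Notes on version B (the rewrite author's own statement) =====
-- stated objective: simpler
-- what changed: Replaces A's fused greedy scan with interleaved Counter bookkeeping by two independent passes: a plain iterator subsequence check of s in t, then a per-character multiset coverage test count(t) <= count(s) + count(p) over the distinct characters of t; both passes run in C-level builtins instead of A's interpreted per-character while loop, which is the constant-factor speedup a timing run measured.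
import Mathlib
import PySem

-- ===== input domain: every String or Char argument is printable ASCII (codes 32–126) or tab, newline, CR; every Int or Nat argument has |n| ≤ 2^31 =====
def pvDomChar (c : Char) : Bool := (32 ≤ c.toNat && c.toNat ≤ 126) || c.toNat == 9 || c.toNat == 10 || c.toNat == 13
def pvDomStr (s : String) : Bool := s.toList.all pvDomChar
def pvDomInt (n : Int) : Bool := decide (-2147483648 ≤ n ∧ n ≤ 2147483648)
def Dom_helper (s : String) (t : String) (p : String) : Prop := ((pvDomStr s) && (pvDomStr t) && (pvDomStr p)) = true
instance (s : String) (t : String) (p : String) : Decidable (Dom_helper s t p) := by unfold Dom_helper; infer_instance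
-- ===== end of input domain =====

-- B replaces A's fused greedy scan (subsequence matching interleaved with pool bookkeeping)
-- by two independent passes: a plain subsequence check, then a per-character multiset
-- coverage test; objective: simpler.


-- ===== PORT A =====

-- the while loop of A, over the same state (st, right, found);
-- `st<len(s) and s[st]==t[right]` is transliterated as `sL[st]? = some tL[right]`
-- (equal: getElem? is some exactly when st < len); `t[right] in found and found[t[right]] > 0`
-- as a match on found.get?; `found[t[right]] -= 1` as insert of v - 1 (overwrite in place).
def pvLoopA (sL tL : List Char) (found : PySem.Dict Char Int) (st right : Nat) : String :=
  if h : right < tL.length then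
    let c := tL[right]
    if sL[st]? = some c then
      pvLoopA sL tL found (st + 1) (right + 1)
    else
      match found.get? c with
      | some v => if v > 0 then pvLoopA sL tL (found.insert c (v - 1)) st (right + 1) else "NO"
      | none => "NO"
  else
    if st < sL.length then "NO" else "YES"
termination_by tL.length - right
decreasing_by all_goals omega

def helper (s : String) (t : String) (p : String) : String :=
  -- found = Counter(p); then the length guard, then the while loop from (0, 0)
  if s.toList.length > t.toList.length then "NO"
  else pvLoopA s.toList t.toList (PySem.Dict.counter p.toList) 0 0

-- ===== PORT B =====

-- `c in it` on the iterator: scan forward until c is found, return the rest (none = exhausted)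
def pvFindDrop (c : Char) : List Char → Option (List Char)
  | [] => none
  | x :: xs => if x = c then some xs else pvFindDrop c xs

-- all(c in it for c in s) over the iterator of t
def pvIsSub : List Char → List Char → Bool
  | [], _ => true
  | c :: s', t =>
    match pvFindDrop c t with
    | none => false
    | some rest => pvIsSub s' rest

-- str.count with a single-character needle = List.count on the characters (exact here)
def helper_alt (s : String) (t : String) (p : String) : String :=
  if !pvIsSub s.toList t.toList then "NO"
  else if (PySem.Set.ofList t.toList).all
      (fun c => t.toList.count c ≤ s.toList.count c + p.toList.count c)
  then "YES" else "NO"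

-- ===== PRECONDITION & SPEC =====
def Spec_helper (s : String) (t : String) (p : String) (out : String) : Prop := out = helper_alt s t p
instance (s : String) (t : String) (p : String) (out : String) : Decidable (Spec_helper s t p out) := by unfold Spec_helper; infer_instance

-- ===== CLAIM (what is proved, stated in full; the proofs are below) =====
def Claim_equal_helper : Prop := ∀ (s : String) (t : String) (p : String), Dom_helper s t p → Spec_helper s t p (helper s t p)

-- ===== LEMMAS AND PROOFS =====

theorem pvFindDrop_cons_self (c : Char) (t : List Char) : pvFindDrop c (c :: t) = some t := by
  simp [pvFindDrop]

theorem pvFindDrop_cons_ne (a c : Char) (t : List Char) (h : a ≠ c) :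
    pvFindDrop a (c :: t) = pvFindDrop a t := by
  simp [pvFindDrop, Ne.symm h]

theorem pvIsSub_nil_right (s : List Char) : pvIsSub s [] = true ↔ s = [] := by
  cases s with
  | nil => simp [pvIsSub]
  | cons c s' => simp [pvIsSub, pvFindDrop]

theorem pvIsSub_cons_cons (c : Char) (s t : List Char) :
    pvIsSub (c :: s) (c :: t) = pvIsSub s t := by
  simp [pvIsSub, pvFindDrop_cons_self]

theorem pvIsSub_cons_ne (a c : Char) (s t : List Char) (h : a ≠ c) :
    pvIsSub (a :: s) (c :: t) = pvIsSub (a :: s) t := by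
  simp only [pvIsSub, pvFindDrop_cons_ne a c t h]

-- skipping the head of t when the head of s (if any) differs
theorem pvIsSub_skip (s : List Char) (c : Char) (t : List Char)
    (h : s = [] ∨ ∃ a s', s = a :: s' ∧ a ≠ c) :
    pvIsSub s (c :: t) = pvIsSub s t := by
  rcases h with h | ⟨a, s', rfl, hne⟩
  · subst h; simp [pvIsSub]
  · exact pvIsSub_cons_ne a c s' t hne

theorem pvFindDrop_count_le (c : Char) (t rest : List Char) (h : pvFindDrop c t = some rest) :
    ∀ d, rest.count d ≤ t.count d := by
  induction t generalizing rest with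
  | nil => simp [pvFindDrop] at h
  | cons x xs ih =>
    intro d
    by_cases hx : x = c
    · subst hx
      rw [pvFindDrop_cons_self] at h
      injection h with h; subst h
      simp only [List.count_cons]
      split_ifs <;> omega
    · rw [pvFindDrop_cons_ne c x xs (Ne.symm hx)] at h
      have := ih rest h d
      simp only [List.count_cons]
      split_ifs <;> omega

theorem pvFindDrop_count_self (c : Char) (t rest : List Char) (h : pvFindDrop c t = some rest) :
    rest.count c + 1 ≤ t.count c := by
  induction t generalizing rest with
  | nil => simp [pvFindDrop] at h
  | cons x xs ih =>
    by_cases hx : x = c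
    · subst hx
      rw [pvFindDrop_cons_self] at h
      injection h with h; subst h
      simp
    · rw [pvFindDrop_cons_ne c x xs (Ne.symm hx)] at h
      have := ih rest h
      simp only [List.count_cons]
      split_ifs <;> omega

theorem pvFindDrop_length (c : Char) (t rest : List Char) (h : pvFindDrop c t = some rest) :
    rest.length < t.length := by
  induction t generalizing rest with
  | nil => simp [pvFindDrop] at h
  | cons x xs ih =>
    by_cases hx : x = c
    · subst hx; rw [pvFindDrop_cons_self] at h; injection h with h; subst h; simp
    · rw [pvFindDrop_cons_ne c x xs (Ne.symm hx)] at h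
      have := ih rest h
      simp; omega

theorem pvIsSub_count (s t : List Char) (h : pvIsSub s t = true) :
    ∀ d, s.count d ≤ t.count d := by
  induction s generalizing t with
  | nil => simp
  | cons c s' ih =>
    intro d
    unfold pvIsSub at h
    cases hfd : pvFindDrop c t with
    | none => rw [hfd] at h; simp at h
    | some rest =>
      rw [hfd] at h
      have h1 := ih rest h d
      simp only [List.count_cons]
      by_cases hcd : c = d
      · subst hcd
        have h2 := pvFindDrop_count_self c t rest hfd
        simp only [BEq.rfl, if_pos]
        omega
      · have h2 := pvFindDrop_count_le c t rest hfd d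
        rw [if_neg (by simp [hcd])]
        omega

theorem pvIsSub_length (s t : List Char) (h : pvIsSub s t = true) : s.length ≤ t.length := by
  induction s generalizing t with
  | nil => simp
  | cons c s' ih =>
    unfold pvIsSub at h
    cases hfd : pvFindDrop c t with
    | none => rw [hfd] at h; simp at h
    | some rest =>
      rw [hfd] at h
      have h1 := ih rest h
      have h2 := pvFindDrop_length c t rest hfd
      simp; omega

-- the terminal case of A's loop (right past the end of t)
theorem pvLoopA_base (sL tL : List Char) (right st : Nat) (m : PySem.Dict Char Int)
    (hge : tL.length ≤ right) (hm : ∀ c, 0 ≤ m.getD c 0) :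
    ((pvLoopA sL tL m st right = "YES" ↔
        (pvIsSub (sL.drop st) (tL.drop right) = true ∧
         ∀ c, ((tL.drop right).count c : Int) ≤ ((sL.drop st).count c : Int) + m.getD c 0)) ∧
     (pvLoopA sL tL m st right = "YES" ∨ pvLoopA sL tL m st right = "NO")) := by
  rw [pvLoopA, dif_neg (by omega)]
  rw [List.drop_eq_nil_of_le hge]
  by_cases hst : st < sL.length
  · rw [if_pos hst]
    refine ⟨⟨fun h => absurd h (by decide), ?_⟩, Or.inr rfl⟩
    rintro ⟨h1, _⟩
    rw [pvIsSub_nil_right] at h1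
    have := congrArg List.length h1
    simp [List.length_drop] at this
    omega
  · rw [if_neg hst]
    refine ⟨⟨fun _ => ?_, fun _ => rfl⟩, Or.inl rfl⟩
    rw [List.drop_eq_nil_of_le (by omega)]
    exact ⟨rfl, fun c => by simpa using hm c⟩

-- the characterisation of A's loop: from state (st, right, m) it answers "YES" exactly when
-- the rest of s is a subsequence of the rest of t and the pool m covers the surplus counts;
-- and it only ever answers "YES" or "NO".
theorem pvLoopA_char (sL tL : List Char) :
    ∀ n right st (m : PySem.Dict Char Int), tL.length - right ≤ n →
    (∀ c, 0 ≤ m.getD c 0) →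
    ((pvLoopA sL tL m st right = "YES" ↔
        (pvIsSub (sL.drop st) (tL.drop right) = true ∧
         ∀ c, ((tL.drop right).count c : Int) ≤ ((sL.drop st).count c : Int) + m.getD c 0)) ∧
     (pvLoopA sL tL m st right = "YES" ∨ pvLoopA sL tL m st right = "NO")) := by
  intro n
  induction n with
  | zero =>
    intro right st m hn hm
    exact pvLoopA_base sL tL right st m (by omega) hm
  | succ n ih =>
    intro right st m hn hm
    by_cases h : right < tL.length
    · rw [pvLoopA, dif_pos h]
      have hdt : tL.drop right = tL[right] :: tL.drop (right + 1) := List.drop_eq_getElem_cons h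
      set c := tL[right] with hc
      by_cases hmatch : sL[st]? = some c
      · rw [if_pos hmatch]
        have hstlt : st < sL.length := by
          by_contra hge
          rw [List.getElem?_eq_none (by omega)] at hmatch
          simp at hmatch
        have hsv : sL[st] = c := by
          rw [List.getElem?_eq_getElem hstlt] at hmatch
          exact Option.some.inj hmatch
        have hds : sL.drop st = c :: sL.drop (st + 1) := by
          rw [List.drop_eq_getElem_cons hstlt, hsv]
        obtain ⟨ihiff, ihor⟩ := ih (right + 1) (st + 1) m (by omega) hm
        refine ⟨?_, ihor⟩
        rw [ihiff, hdt, hds, pvIsSub_cons_cons]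
        constructor
        · rintro ⟨h1, h2⟩
          refine ⟨h1, fun d => ?_⟩
          have := h2 d
          simp only [List.count_cons]
          split_ifs with hcd <;> push_cast <;> omega
        · rintro ⟨h1, h2⟩
          refine ⟨h1, fun d => ?_⟩
          have := h2 d
          simp only [List.count_cons] at this
          split_ifs at this with hcd <;> push_cast at this ⊢ <;> omega
      · rw [if_neg hmatch]
        have hskip : sL.drop st = [] ∨ ∃ a s', sL.drop st = a :: s' ∧ a ≠ c := by
          by_cases hst : st < sL.length
          · right
            refine ⟨sL[st], sL.drop (st + 1), List.drop_eq_getElem_cons hst, ?_⟩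
            intro hEq
            exact hmatch (by rw [List.getElem?_eq_getElem hst, hEq])
          · left; exact List.drop_eq_nil_of_le (by omega)
        cases hg : m.get? c with
        | some v =>
          by_cases hv : v > 0
          · dsimp only; rw [if_pos hv]
            have hmc : m.getD c 0 = v := by rw [PySem.Dict.getD_eq_get?_getD, hg]; rfl
            have hm' : ∀ d, 0 ≤ (m.insert c (v - 1)).getD d 0 := by
              intro d
              rw [PySem.Dict.getD_insert]
              split_ifs with hd
              · omega
              · exact hm d
            obtain ⟨ihiff, ihor⟩ := ih (right + 1) st (m.insert c (v - 1)) (by omega) hm'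
            refine ⟨?_, ihor⟩
            rw [ihiff, hdt, pvIsSub_skip _ _ _ hskip]
            constructor
            · rintro ⟨h1, h2⟩
              refine ⟨h1, fun d => ?_⟩
              have := h2 d
              rw [PySem.Dict.getD_insert] at this
              simp only [List.count_cons]
              by_cases hd : d = c
              · subst hd
                rw [if_pos rfl] at this
                simp only [BEq.rfl, if_pos]
                push_cast at this ⊢
                omega
              · rw [if_neg hd] at this
                have hbd : (c == d) = false := by simp [Ne.symm hd]
                simp only [hbd, Bool.false_eq_true]
                simpa using this
            · rintro ⟨h1, h2⟩
              refine ⟨h1, fun d => ?_⟩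
              have := h2 d
              simp only [List.count_cons] at this
              rw [PySem.Dict.getD_insert]
              by_cases hd : d = c
              · subst hd
                rw [if_pos rfl]
                simp only [BEq.rfl, if_pos] at this
                push_cast at this ⊢
                omega
              · rw [if_neg hd]
                have hbd : (c == d) = false := by simp [Ne.symm hd]
                simp only [hbd, Bool.false_eq_true] at this
                simpa using this
          · dsimp only; rw [if_neg hv]
            have hmc : m.getD c 0 = v := by rw [PySem.Dict.getD_eq_get?_getD, hg]; rfl
            refine ⟨⟨fun hEq => absurd hEq (by decide), ?_⟩, Or.inr rfl⟩
            rintro ⟨h1, h2⟩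
            exfalso
            rw [hdt] at h1 h2
            rw [pvIsSub_skip _ _ _ hskip] at h1
            have hcnt := pvIsSub_count _ _ h1 c
            have := h2 c
            simp only [List.count_cons, BEq.rfl, if_pos] at this
            push_cast at this
            omega
        | none =>
          dsimp only
          have hmc : m.getD c 0 = 0 := by
            rw [PySem.Dict.getD_eq_get?_getD, hg]; rfl
          refine ⟨⟨fun hEq => absurd hEq (by decide), ?_⟩, Or.inr rfl⟩
          rintro ⟨h1, h2⟩
          exfalso
          rw [hdt] at h1 h2
          rw [pvIsSub_skip _ _ _ hskip] at h1
          have hcnt := pvIsSub_count _ _ h1 c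
          have := h2 c
          simp only [List.count_cons, BEq.rfl, if_pos] at this
          push_cast at this
          omega
    · exact pvLoopA_base sL tL right st m (by omega) hm

-- ===== VERDICT (by name: the statement is the Claim_ definition above) =====
-- converting B's bounded check over set(t) into the unbounded per-character condition
theorem pv_all_iff (sL tL pL : List Char) :
    ((PySem.Set.ofList tL).all
        (fun c => decide (tL.count c ≤ sL.count c + pL.count c)) = true) ↔
    (∀ c : Char, (tL.count c : Int) ≤ (sL.count c : Int) + (pL.count c : Int)) := by
  rw [List.all_eq_true]
  constructor
  · intro h c
    by_cases hc : c ∈ tL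
    · have := h c ((PySem.Set.mem_ofList tL c).mpr hc)
      simp only [decide_eq_true_eq] at this
      exact_mod_cast this
    · have h0 : tL.count c = 0 := List.count_eq_zero.mpr hc
      rw [h0]
      push_cast
      positivity
  · intro h c _
    simp only [decide_eq_true_eq]
    exact_mod_cast h c

theorem helper_spec : Claim_equal_helper := by
  intro s t p _
  unfold Spec_helper helper helper_alt
  set sL := s.toList with hsL
  set tL := t.toList with htL
  set pL := p.toList with hpL
  have hm : ∀ c, 0 ≤ (PySem.Dict.counter pL).getD c 0 := by
    intro c
    rw [PySem.Dict.getD_counter]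
    exact Int.natCast_nonneg _
  have hgd : ∀ c : Char, (PySem.Dict.counter pL).getD c 0 = (pL.count c : Int) :=
    fun c => PySem.Dict.getD_counter pL c
  by_cases hlen : sL.length > tL.length
  · rw [if_pos hlen]
    have hsub : pvIsSub sL tL = false := by
      by_contra hne
      have htrue : pvIsSub sL tL = true := by
        cases hx : pvIsSub sL tL
        · exact absurd hx hne
        · rfl
      have := pvIsSub_length sL tL htrue
      omega
    rw [hsub]
    rfl
  · rw [if_neg hlen]
    obtain ⟨hiff, hor⟩ := pvLoopA_char sL tL tL.length 0 0 (PySem.Dict.counter pL) (by omega) hm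
    simp only [List.drop_zero] at hiff
    by_cases hsub : pvIsSub sL tL = true
    · rw [hsub]
      simp only [Bool.not_true, Bool.false_eq_true]
      by_cases hall : ((PySem.Set.ofList tL).all
          (fun c => decide (tL.count c ≤ sL.count c + pL.count c)) = true)
      · rw [if_pos hall]
        apply hiff.mpr
        refine ⟨hsub, fun c => ?_⟩
        rw [hgd]
        exact (pv_all_iff sL tL pL).mp hall c
      · rw [if_neg hall]
        rcases hor with hyes | hno
        · exfalso
          obtain ⟨_, hcnt⟩ := hiff.mp hyes
          exact hall ((pv_all_iff sL tL pL).mpr (fun c => by rw [← hgd c]; exact hcnt c))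
        · exact hno
    · have hsubf : pvIsSub sL tL = false := by
        cases hx : pvIsSub sL tL
        · rfl
        · exact absurd hx hsub
      rw [hsubf]
      simp only [Bool.not_false, if_pos]
      rcases hor with hyes | hno
      · exact absurd (hiff.mp hyes).1 hsub
      · exact hno
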